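-- pv_equiv track=rewrite | github.com/pypi-data/pypi-mirror-402 | packages/article-extractor/article_extractor-0.5.5.tar.gz/article_extractor-0.5.5/src/article_extractor/network.py | host_matches_no_proxy
-- ===== SOURCE A (Python) =====
-- from collections.abc import Mapping, Sequence
--
-- def host_matches_no_proxy(  # noqa: PLR0911 - multiple early returns aid readability
--     host: str | None, patterns: Sequence[str]
-- ) -> bool:
--     """Return True if host should bypass proxy according to NO_PROXY semantics."""
--
--     if not host:
--         return True
--
--     host = host.lower()
--
--     for raw in patterns:
--         target = raw.strip().lower()
--         if not target:
--             continue
--         if target == "*":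
--             return True
--         if target.startswith("."):
--             if host.endswith(target.lstrip(".")):
--                 return True
--         elif target.startswith("*"):
--             suffix = target.lstrip("*")
--             if suffix and host.endswith(suffix):
--                 return True
--         elif target.count(":") == 1:
--             hostname, _port = target.split(":", 1)
--             if hostname and host == hostname:
--                 return True
--         elif host == target:
--             return True
--     return False
-- ===== SOURCE B (Python) =====
-- def host_matches_no_proxy(host, patterns):
--     """Return True if host should bypass proxy according to NO_PROXY semantics."""
--     if not host:
--         return True
--     host = host.lower()
--     has_wildcard = False
--     exact = []
--     suffixes = []
--     for raw in patterns:
--         target = raw.strip().lower()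
--         if not target:
--             continue
--         if target == "*":
--             has_wildcard = True
--         elif target.startswith("."):
--             suffixes.append(target.lstrip("."))
--         elif target.startswith("*"):
--             s = target.lstrip("*")
--             if s:
--                 suffixes.append(s)
--         elif target.count(":") == 1:
--             hostname = target.split(":", 1)[0]
--             if hostname:
--                 exact.append(hostname)
--         else:
--             exact.append(target)
--     return has_wildcard or host in exact or any(host.endswith(s) for s in suffixes)
-- ===== Notes on version B (the rewrite author's own statement) =====
-- stated objective: simpler
-- what changed: Replaces A's early-return cascade inside the loop by a single classification pass that builds a wildcard flag, an exact-host list and a suffix list, followed by one combined membership/endswith check.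
import Mathlib
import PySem

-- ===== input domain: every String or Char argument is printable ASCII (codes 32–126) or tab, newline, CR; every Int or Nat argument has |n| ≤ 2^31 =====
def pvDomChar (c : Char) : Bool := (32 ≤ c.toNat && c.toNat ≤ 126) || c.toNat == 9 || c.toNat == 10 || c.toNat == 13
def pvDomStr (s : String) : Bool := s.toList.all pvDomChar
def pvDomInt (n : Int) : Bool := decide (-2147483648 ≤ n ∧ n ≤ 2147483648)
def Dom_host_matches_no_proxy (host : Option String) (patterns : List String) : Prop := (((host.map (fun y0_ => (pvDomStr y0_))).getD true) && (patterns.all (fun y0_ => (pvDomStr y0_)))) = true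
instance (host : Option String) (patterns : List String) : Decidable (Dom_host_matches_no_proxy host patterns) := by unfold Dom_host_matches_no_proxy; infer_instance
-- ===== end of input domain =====

-- B replaces A's early-return cascade by one classification pass (wildcard flag, exact-host list, suffix list)
-- followed by a single combined membership/suffix check; objective: simpler/idiomatic.

-- ===== PORT A =====
-- normalized pattern: target = raw.strip().lower()  (on List Char; exact via PySem.Chars)
def pvTargetOf (raw : String) : List Char := PySem.Chars.lower (PySem.Chars.strip raw.toList)

-- target.lstrip(".") / lstrip("*") for a single-char set is exactly dropWhile on that char
def pvLstrip (c : Char) (cs : List Char) : List Char := cs.dropWhile (· == c)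

-- the for-loop of A, early returns become `true`, `continue` recurses
def pvLoopA (host : List Char) : List String → Bool
  | [] => false
  | raw :: rest =>
    let target := pvTargetOf raw
    if target = [] then pvLoopA host rest
    else if target = ['*'] then true
    else if PySem.Chars.startswith target ['.'] then
      if PySem.Chars.endswith host (pvLstrip '.' target) then true else pvLoopA host rest
    else if PySem.Chars.startswith target ['*'] then
      let suffix := pvLstrip '*' target
      if suffix ≠ [] ∧ PySem.Chars.endswith host suffix then true else pvLoopA host rest
    else if PySem.Chars.count target [':'] = 1 then
      -- target.split(":", 1)[0]
      let hostname := (PySem.Chars.splitOnMax target [':'] 1).headD []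
      if hostname ≠ [] ∧ host = hostname then true else pvLoopA host rest
    else if host = target then true else pvLoopA host rest

def host_matches_no_proxy (host : Option String) (patterns : List String) : Bool :=
  match host with
  | none => true
  | some h =>
    if h.toList = [] then true    -- `if not host`
    else pvLoopA (PySem.Chars.lower h.toList) patterns

-- ===== PORT B =====
-- one pass: classify each pattern into (has_wildcard, exact hosts, suffixes)
def pvClassify (acc : Bool × List (List Char) × List (List Char)) (raw : String) :
    Bool × List (List Char) × List (List Char) :=
  let target := pvTargetOf raw
  if target = [] then acc
  else if target = ['*'] then (true, acc.2.1, acc.2.2)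
  else if PySem.Chars.startswith target ['.'] then
    (acc.1, acc.2.1, acc.2.2 ++ [pvLstrip '.' target])
  else if PySem.Chars.startswith target ['*'] then
    let s := pvLstrip '*' target
    if s = [] then acc else (acc.1, acc.2.1, acc.2.2 ++ [s])
  else if PySem.Chars.count target [':'] = 1 then
    let hostname := (PySem.Chars.splitOnMax target [':'] 1).headD []
    if hostname = [] then acc else (acc.1, acc.2.1 ++ [hostname], acc.2.2)
  else (acc.1, acc.2.1 ++ [target], acc.2.2)

def host_matches_no_proxy_alt (host : Option String) (patterns : List String) : Bool :=
  match host with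
  | none => true
  | some h =>
    if h.toList = [] then true
    else
      let hl := PySem.Chars.lower h.toList
      let acc := patterns.foldl pvClassify (false, [], [])
      acc.1 || acc.2.1.contains hl || acc.2.2.any (fun s => PySem.Chars.endswith hl s)

-- ===== PRECONDITION & SPEC =====
def Spec_host_matches_no_proxy (host : Option String) (patterns : List String) (out : Bool) : Prop := out = host_matches_no_proxy_alt host patterns
instance (host : Option String) (patterns : List String) (out : Bool) : Decidable (Spec_host_matches_no_proxy host patterns out) := by unfold Spec_host_matches_no_proxy; infer_instance

-- ===== CLAIM (what is proved, stated in full; the proofs are below) =====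
def Claim_equal_host_matches_no_proxy : Prop := ∀ (host : Option String) (patterns : List String), Dom_host_matches_no_proxy host patterns → Spec_host_matches_no_proxy host patterns (host_matches_no_proxy host patterns)

-- ===== LEMMAS AND PROOFS =====

-- value of B's final check on an accumulator
def pvCheck (host : List Char) (acc : Bool × List (List Char) × List (List Char)) : Bool :=
  acc.1 || acc.2.1.contains host || acc.2.2.any (fun s => PySem.Chars.endswith host s)

theorem pvCheck_classify (host : List Char) (acc : Bool × List (List Char) × List (List Char))
    (raw : String) :
    pvCheck host (pvClassify acc raw) =
      (pvCheck host acc || pvLoopA host [raw]) := by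
  obtain ⟨w, ex, sufs⟩ := acc
  simp only [pvClassify, pvLoopA, pvCheck]
  split_ifs with h1 h2 h3 h4 h5 <;> simp_all [Bool.or_assoc]

theorem pvCheck_foldl (host : List Char) (patterns : List String)
    (acc : Bool × List (List Char) × List (List Char)) :
    pvCheck host (patterns.foldl pvClassify acc) =
      (pvCheck host acc || pvLoopA host patterns) := by
  induction patterns generalizing acc with
  | nil => simp [pvLoopA]
  | cons raw rest ih =>
    rw [List.foldl_cons, ih, pvCheck_classify]
    -- merge A's single-step with the rest of the loop
    simp only [pvLoopA]
    split_ifs <;> simp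

-- ===== VERDICT (by name: the statement is the Claim_ definition above) =====
theorem host_matches_no_proxy_spec : Claim_equal_host_matches_no_proxy := by
  intro host patterns _
  unfold Spec_host_matches_no_proxy host_matches_no_proxy host_matches_no_proxy_alt
  match host with
  | none => rfl
  | some h =>
    by_cases he : h.toList = []
    · simp [he]
    · simp only [he, ite_false]
      have := pvCheck_foldl (PySem.Chars.lower h.toList) patterns (false, [], [])
      simp [pvCheck] at this
      simp [this]
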